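-- pv_equiv track=rewrite | github.com/grant0417/cot4210-halting-problem | main.py | enumerate_transition_encodings
-- ===== SOURCE A (Python) =====
-- def enumerate_transition_encodings(machine_numb: int, states: int, halting_states: int, symbols: int):
--     encoding = []
--     encoding.append("{}-{}".format(states - halting_states, symbols))
--     for _ in range((states - halting_states) * symbols):
--         symbol = machine_numb % symbols
--         machine_numb //= symbols
--         shift = machine_numb % 2
--         machine_numb //= 2
--         state = machine_numb % states
--         machine_numb //= states
--         encoding.append("{}-{}-{}".format(symbol, shift, state))
--     return '/'.join(encoding)
-- ===== SOURCE B (Python) =====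
-- def enumerate_transition_encodings(machine_numb: int, states: int, halting_states: int, symbols: int):
--     def chunk(m, k):
--         # Divide and conquer: encode k consecutive transitions starting at machine value m,
--         # returning (the '/'-prefixed encoding of those transitions, the machine value after them).
--         if k <= 0:
--             return "", m
--         if k == 1:
--             symbol = m % symbols
--             m //= symbols
--             shift = m % 2
--             m //= 2
--             state = m % states
--             m //= states
--             return "/{}-{}-{}".format(symbol, shift, state), m
--         half = k // 2
--         left, m = chunk(m, half)
--         right, m = chunk(m, k - half)
--         return left + right, m
--     body, _ = chunk(machine_numb, (states - halting_states) * symbols)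
--     return "{}-{}".format(states - halting_states, symbols) + body
-- ===== Notes on version B (the rewrite author's own statement) =====
-- stated objective: alternative
-- what changed: Replaced A's linear loop that appends formatted transitions to a list and joins them by a divide-and-conquer recursion: a chunk encoder splits the transition count in half, recursively encodes each half threading the machine value through, and concatenates the resulting strings (no list, no join).
import Mathlib
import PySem

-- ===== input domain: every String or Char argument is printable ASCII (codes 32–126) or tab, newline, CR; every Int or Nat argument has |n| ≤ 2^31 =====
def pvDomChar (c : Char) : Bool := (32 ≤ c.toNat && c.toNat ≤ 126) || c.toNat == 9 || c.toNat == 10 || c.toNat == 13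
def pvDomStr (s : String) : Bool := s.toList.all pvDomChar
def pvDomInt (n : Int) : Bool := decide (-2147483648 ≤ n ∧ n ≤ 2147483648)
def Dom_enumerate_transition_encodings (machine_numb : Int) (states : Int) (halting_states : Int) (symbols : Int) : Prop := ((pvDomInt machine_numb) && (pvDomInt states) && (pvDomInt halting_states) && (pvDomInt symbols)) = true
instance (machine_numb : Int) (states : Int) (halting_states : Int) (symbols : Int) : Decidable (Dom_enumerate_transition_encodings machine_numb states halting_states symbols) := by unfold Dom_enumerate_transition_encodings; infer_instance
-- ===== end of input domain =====

-- B replaces A's linear append-and-join loop by a divide-and-conquer chunk encoder that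
-- splits the transition count in half and concatenates the two halves' encodings (objective: alternative).

-- ===== PORT A =====
def enumerate_transition_encodings (machine_numb : Int) (states : Int) (halting_states : Int) (symbols : Int) : String :=
  let encoding : List String := [PySem.Int.toStr (states - halting_states) ++ "-" ++ PySem.Int.toStr symbols]
  let r := (PySem.List.pyRange 0 ((states - halting_states) * symbols) 1).foldl
    (fun (p : Int × List String) _ =>
      let m := p.1
      let symbol := PySem.Int.mod m symbols
      let m := PySem.Int.floordiv m symbols
      let shift := PySem.Int.mod m 2
      let m := PySem.Int.floordiv m 2
      let state := PySem.Int.mod m states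
      let m := PySem.Int.floordiv m states
      (m, p.2 ++ [PySem.Int.toStr symbol ++ "-" ++ PySem.Int.toStr shift ++ "-" ++ PySem.Int.toStr state]))
    (machine_numb, encoding)
  PySem.Str.join "/" r.2

-- ===== PORT B =====
-- B's inner 'chunk(m, k)': divide-and-conquer encoder of k consecutive transitions
def pvChunk (states symbols : Int) (m k : Int) : String × Int :=
  if k ≤ 0 then ("", m)
  else if k = 1 then
    let symbol := PySem.Int.mod m symbols
    let m1 := PySem.Int.floordiv m symbols
    let shift := PySem.Int.mod m1 2
    let m2 := PySem.Int.floordiv m1 2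
    let state := PySem.Int.mod m2 states
    let m3 := PySem.Int.floordiv m2 states
    ("/" ++ PySem.Int.toStr symbol ++ "-" ++ PySem.Int.toStr shift ++ "-" ++ PySem.Int.toStr state, m3)
  else
    let half := PySem.Int.floordiv k 2
    let l := pvChunk states symbols m half
    let r := pvChunk states symbols l.2 (k - half)
    (l.1 ++ r.1, r.2)
termination_by k.toNat
decreasing_by
  all_goals
    rw [PySem.Int.floordiv_eq_ediv_of_pos (by norm_num : (0:Int) < 2)]
    omega

def enumerate_transition_encodings_alt (machine_numb : Int) (states : Int) (halting_states : Int) (symbols : Int) : String :=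
  let body := (pvChunk states symbols machine_numb ((states - halting_states) * symbols)).1
  (PySem.Int.toStr (states - halting_states) ++ "-" ++ PySem.Int.toStr symbols) ++ body

-- ===== PRECONDITION & SPEC =====
-- Pre_ excludes exactly the inputs on which Python A raises ZeroDivisionError:
-- the loop runs ((states-halting_states)*symbols > 0) while states = 0.
def Pre_enumerate_transition_encodings (machine_numb : Int) (states : Int) (halting_states : Int) (symbols : Int) : Prop :=
  (states - halting_states) * symbols ≤ 0 ∨ states ≠ 0
instance (machine_numb : Int) (states : Int) (halting_states : Int) (symbols : Int) : Decidable (Pre_enumerate_transition_encodings machine_numb states halting_states symbols) := by unfold Pre_enumerate_transition_encodings; infer_instance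
def pvWitness_enumerate_transition_encodings : Int × Int × Int × Int := (100, 3, 1, 2)

def Spec_enumerate_transition_encodings (machine_numb : Int) (states : Int) (halting_states : Int) (symbols : Int) (out : String) : Prop := out = enumerate_transition_encodings_alt machine_numb states halting_states symbols
instance (machine_numb : Int) (states : Int) (halting_states : Int) (symbols : Int) (out : String) : Decidable (Spec_enumerate_transition_encodings machine_numb states halting_states symbols out) := by unfold Spec_enumerate_transition_encodings; infer_instance

-- ===== CLAIM (what is proved, stated in full; the proofs are below) =====
def Claim_equal_enumerate_transition_encodings : Prop := ∀ (machine_numb : Int) (states : Int) (halting_states : Int) (symbols : Int), Dom_enumerate_transition_encodings machine_numb states halting_states symbols → Pre_enumerate_transition_encodings machine_numb states halting_states symbols → Spec_enumerate_transition_encodings machine_numb states halting_states symbols (enumerate_transition_encodings machine_numb states halting_states symbols)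

-- ===== LEMMAS AND PROOFS =====

-- the per-transition strings A produces, as a pure recursion on the trip count
def pvStepsA (states symbols : Int) : Nat → Int → List String
  | 0, _ => []
  | n + 1, m =>
      let m1 := PySem.Int.floordiv m symbols
      let m2 := PySem.Int.floordiv m1 2
      (PySem.Int.toStr (PySem.Int.mod m symbols) ++ "-" ++ PySem.Int.toStr (PySem.Int.mod m1 2) ++ "-" ++ PySem.Int.toStr (PySem.Int.mod m2 states))
        :: pvStepsA states symbols n (PySem.Int.floordiv m2 states)

-- the sequential (left-to-right) reading of B's chunk encoder
def pvSeq (states symbols : Int) : Nat → Int → String × Int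
  | 0, m => ("", m)
  | n + 1, m =>
      let m1 := PySem.Int.floordiv m symbols
      let m2 := PySem.Int.floordiv m1 2
      let r := pvSeq states symbols n (PySem.Int.floordiv m2 states)
      ("/" ++ PySem.Int.toStr (PySem.Int.mod m symbols) ++ "-" ++ PySem.Int.toStr (PySem.Int.mod m1 2) ++ "-" ++ PySem.Int.toStr (PySem.Int.mod m2 states) ++ r.1, r.2)

theorem foldA_eq (states symbols : Int) :
    ∀ (l : List Int) (m : Int) (acc : List String),
      (l.foldl
        (fun (p : Int × List String) _ =>
          let m := p.1
          let symbol := PySem.Int.mod m symbols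
          let m := PySem.Int.floordiv m symbols
          let shift := PySem.Int.mod m 2
          let m := PySem.Int.floordiv m 2
          let state := PySem.Int.mod m states
          let m := PySem.Int.floordiv m states
          (m, p.2 ++ [PySem.Int.toStr symbol ++ "-" ++ PySem.Int.toStr shift ++ "-" ++ PySem.Int.toStr state]))
        (m, acc)).2 = acc ++ pvStepsA states symbols l.length m := by
  intro l
  induction l with
  | nil => intro m acc; simp [pvStepsA]
  | cons a t ih =>
      intro m acc
      simp only [List.foldl_cons, List.length_cons, pvStepsA, ih]
      simp

theorem pvSeq_add (states symbols : Int) :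
    ∀ (a b : Nat) (m : Int),
      pvSeq states symbols (a + b) m =
        ((pvSeq states symbols a m).1 ++ (pvSeq states symbols b (pvSeq states symbols a m).2).1,
         (pvSeq states symbols b (pvSeq states symbols a m).2).2) := by
  intro a
  induction a with
  | zero => intro b m; simp only [Nat.zero_add, pvSeq, String.empty_append]
  | succ k ih =>
      intro b m
      have hkb : k + 1 + b = (k + b) + 1 := by omega
      rw [hkb]
      simp only [pvSeq]
      rw [ih]
      simp only [String.append_assoc]


theorem str_join_singleton (sep p : String) : PySem.Str.join sep [p] = p := by
  apply String.toList_inj.mp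
  simp [PySem.Str.toList_join, PySem.Chars.join_singleton]

theorem str_join_cons_cons (sep p q : String) (rest : List String) :
    PySem.Str.join sep (p :: q :: rest) = p ++ sep ++ PySem.Str.join sep (q :: rest) := by
  apply String.toList_inj.mp
  simp [PySem.Str.toList_join, PySem.Chars.join_cons_cons]

theorem chunk_eq_seq (states symbols : Int) :
    ∀ (n : Nat) (k m : Int), k.toNat = n → pvChunk states symbols m k = pvSeq states symbols k.toNat m := by
  intro n
  induction n using Nat.strong_induction_on with
  | _ n ih =>
    intro k m hn
    rw [pvChunk]
    by_cases h0 : k ≤ 0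
    · rw [if_pos h0, (by omega : k.toNat = 0)]
      rfl
    · by_cases h1 : k = 1
      · subst h1
        rw [if_neg h0, if_pos rfl, (by rfl : (1 : Int).toNat = 0 + 1)]
        simp only [pvSeq, String.append_empty]
      · simp only [if_neg h0, if_neg h1]
        rw [PySem.Int.floordiv_eq_ediv_of_pos (by norm_num : (0:Int) < 2)]
        have h1' : ((k / 2 : Int)).toNat < n := by omega
        have h2' : ((k - k / 2 : Int)).toNat < n := by omega
        rw [ih _ h1' _ m rfl, ih _ h2' _ _ rfl]
        have hsplit : ((k / 2 : Int)).toNat + ((k - k / 2 : Int)).toNat = k.toNat := by omega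
        rw [← hsplit, pvSeq_add]

-- join "/" over head :: A's step strings = head ++ B's slash-prefixed sequential encoding
theorem join_steps (states symbols : Int) :
    ∀ (n : Nat) (m : Int) (h : String),
      PySem.Str.join "/" (h :: pvStepsA states symbols n m) = h ++ (pvSeq states symbols n m).1 := by
  intro n
  induction n with
  | zero =>
      intro m h
      simp only [pvStepsA, pvSeq]
      rw [str_join_singleton, String.append_empty]
  | succ k ih =>
      intro m h
      simp only [pvStepsA, pvSeq]
      rw [str_join_cons_cons, ih]
      simp only [String.append_assoc]

-- ===== VERDICT (by name: the statement is the Claim_ definition above) =====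
theorem enumerate_transition_encodings_spec : Claim_equal_enumerate_transition_encodings := by
  intro machine_numb states halting_states symbols _ _
  unfold Spec_enumerate_transition_encodings
  unfold enumerate_transition_encodings enumerate_transition_encodings_alt
  simp only [foldA_eq]
  rw [PySem.List.pyRange_one]
  simp only [List.length_map, List.length_range, Int.sub_zero, List.singleton_append]
  rw [chunk_eq_seq states symbols ((states - halting_states) * symbols).toNat _ _ rfl]
  rw [join_steps]
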